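-- pv_equiv track=rewrite | github.com/knutae/adventofcode | 2024/04/solve.py | diagonals_up
-- ===== SOURCE A (Python) =====
-- def diagonals_up(lines):
--     height = len(lines)
--     width = len(lines[0])
--     r = []
--     for start_y in range(height*2):
--         r.append(
--             ''.join(
--                 lines[start_y - x][x]
--                 for x in range(width)
--                 if (start_y - x) in range(height)))
--     return [line for line in r if len(line) >= 4]
-- ===== SOURCE B (Python) =====
-- def diagonals_up(lines):
--     width = len(lines[0])
--     size = len(lines) * 2
--     groups = [''] * size
--     for y, row in enumerate(lines):
--         for x, c in enumerate(row[:width]):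
--             d = y + x
--             if d < size:
--                 groups[d] = c + groups[d]
--     return [g for g in groups if len(g) >= 4]
-- ===== Notes on version B (the rewrite author's own statement) =====
-- stated objective: alternative
-- what changed: Instead of scanning all width columns for each of the 2*height candidate diagonals with an in-range(height) membership test, B makes one pass over the grid cells via enumerate (rows top-down), prepending each character to its anti-diagonal group d = y + x in a preallocated table, then filters by length.
import Mathlib
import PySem

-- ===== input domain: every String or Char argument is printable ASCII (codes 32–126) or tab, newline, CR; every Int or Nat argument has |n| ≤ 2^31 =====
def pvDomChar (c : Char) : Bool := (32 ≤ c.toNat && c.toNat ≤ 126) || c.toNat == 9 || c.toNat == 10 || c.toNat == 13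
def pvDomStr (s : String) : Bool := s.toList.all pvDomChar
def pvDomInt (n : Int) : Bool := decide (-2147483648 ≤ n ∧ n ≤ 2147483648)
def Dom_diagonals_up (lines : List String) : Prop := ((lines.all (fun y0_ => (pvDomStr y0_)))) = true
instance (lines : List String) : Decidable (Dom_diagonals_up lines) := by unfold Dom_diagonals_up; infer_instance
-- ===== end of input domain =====

-- B replaces A's per-diagonal column scan (with an in-range membership test) by one enumerate
-- pass over the rows, prepending each character to its anti-diagonal group d = y + x
-- (objective: alternative single-pass decomposition).
-- Both Pythons raise IndexError on an empty list; A also raises on ragged grids whose accessed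
-- cells are missing; Pre_ excludes exactly the inputs where A raises.

-- ===== PORT A =====
def diagonals_up (lines : List String) : List String :=
  let height : Int := PySem.List.len lines
  let width : Int := PySem.Str.len (PySem.List.pyGetD lines 0 "")
  let r : List (List Char) :=
    (PySem.List.pyRange 0 (height * 2)).foldl (fun r sy =>
      r ++ [(PySem.List.pyRange 0 width).filterMap (fun x =>
        if 0 ≤ sy - x ∧ sy - x < height then
          some ((PySem.List.pyGetD lines (sy - x) "").toList.getD x.toNat ' ')
        else none)]) []
  (r.filter (fun l => 4 ≤ l.length)).map String.ofList

-- ===== PORT B =====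
def diagonals_up_alt (lines : List String) : List String :=
  let width : Int := PySem.Str.len (PySem.List.pyGetD lines 0 "")
  let size : Int := PySem.List.len lines * 2
  let groups : List (List Char) :=
    (PySem.List.enumerate lines).foldl (fun g yr =>
      (PySem.List.enumerate (PySem.List.slice yr.2.toList none (some width))).foldl (fun g xc =>
        if yr.1 + xc.1 < size then
          PySem.List.pySetD g (yr.1 + xc.1)
            (xc.2 :: PySem.List.pyGetD g (yr.1 + xc.1) [])
        else g) g)
      (List.replicate size.toNat [])
  (groups.filter (fun l => 4 ≤ l.length)).map String.ofList

-- ===== PRECONDITION & SPEC =====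
-- Pre_ excludes exactly the inputs on which the Python A raises IndexError: the empty list
-- (lines[0]) and grids where some actually-indexed cell (y,x) with x < len(lines[0]) and
-- y + x < 2*len(lines) lies beyond the end of its line.
def Pre_diagonals_up (lines : List String) : Prop :=
  lines ≠ [] ∧ ∀ y < lines.length, ∀ x < (lines.getD 0 "").toList.length,
    y + x < 2 * lines.length → x < (lines.getD y "").toList.length
instance (lines : List String) : Decidable (Pre_diagonals_up lines) := by
  unfold Pre_diagonals_up; infer_instance
def pvWitness_diagonals_up : List String := ["ABCD", "EFGH", "IJKL", "MNOP"]

def Spec_diagonals_up (lines : List String) (out : List String) : Prop := out = diagonals_up_alt lines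
instance (lines : List String) (out : List String) : Decidable (Spec_diagonals_up lines out) := by unfold Spec_diagonals_up; infer_instance

-- ===== CLAIM (what is proved, stated in full; the proofs are below) =====
def Claim_equal_diagonals_up : Prop := ∀ (lines : List String), Dom_diagonals_up lines → Pre_diagonals_up lines → Spec_diagonals_up lines (diagonals_up lines)

-- ===== LEMMAS AND PROOFS =====

-- character of the grid at row y, column x (total form used in the common normal form)
def pvChr (lines : List String) (y x : Nat) : Char :=
  (lines.getD y "").toList.getD x ' '

-- A's diagonal d, in Nat form
def pvDiagA (lines : List String) (w h d : Nat) : List Char :=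
  (List.range w).filterMap (fun x =>
    if x ≤ d ∧ d - x < h then some (pvChr lines (d - x) x) else none)

-- B's inner loop over row y (chars cs, first n of them), Nat form
def pvIn2 (size y : Nat) (cs : List Char) (n : Nat) (g : List (List Char)) : List (List Char) :=
  (List.range n).foldl (fun g x =>
    if y + x < size then (g.set (y + x) (cs.getD x ' ' :: g.getD (y + x) [])) else g) g

theorem pvIn2_succ (size y : Nat) (cs : List Char) (n : Nat) (g : List (List Char)) :
    pvIn2 size y cs (n + 1) g
      = (if y + n < size then
          (pvIn2 size y cs n g).set (y + n)
            (cs.getD n ' ' :: (pvIn2 size y cs n g).getD (y + n) [])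
        else pvIn2 size y cs n g) := by
  unfold pvIn2
  rw [List.range_succ, List.foldl_append, List.foldl_cons, List.foldl_nil]

theorem pvIn2_length (size y : Nat) (cs : List Char) (n : Nat) (g : List (List Char)) :
    (pvIn2 size y cs n g).length = g.length := by
  induction n with
  | zero => rfl
  | succ n ih =>
      rw [pvIn2_succ]
      split
      · rw [List.length_set]; exact ih
      · exact ih

theorem pvIn2_getD (size y : Nat) (cs : List Char) (n : Nat) (g : List (List Char))
    (hg : g.length = size) (d : Nat) :
    (pvIn2 size y cs n g).getD d []
      = (if y ≤ d ∧ d - y < n ∧ d < size then [cs.getD (d - y) ' '] else []) ++ g.getD d [] := by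
  induction n with
  | zero => simp [pvIn2]
  | succ n ih =>
      have hlen : (pvIn2 size y cs n g).length = size := by rw [pvIn2_length, hg]
      rw [pvIn2_succ]
      by_cases hc : y + n < size
      · rw [if_pos hc]
        by_cases hd : d = y + n
        · subst hd
          rw [List.getD_eq_getElem?_getD, List.getElem?_set, if_pos rfl,
            if_pos (by omega), Option.getD_some, ih]
          rw [if_neg (by omega), if_pos (by omega), List.nil_append]
          congr 2
          omega
        · rw [List.getD_eq_getElem?_getD, List.getElem?_set, if_neg (by omega),
            ← List.getD_eq_getElem?_getD, ih]
          congr 1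
          by_cases h1 : y ≤ d ∧ d - y < n ∧ d < size
          · rw [if_pos h1, if_pos ⟨h1.1, by omega, h1.2.2⟩]
          · by_cases h2 : y ≤ d ∧ d - y < n + 1 ∧ d < size
            · exact absurd (by omega : d = y + n) hd
            · rw [if_neg h2, if_neg h1]
      · rw [if_neg hc, ih]
        congr 1
        by_cases h1 : y ≤ d ∧ d - y < n ∧ d < size
        · rw [if_pos h1, if_pos ⟨h1.1, by omega, h1.2.2⟩]
        · by_cases h2 : y ≤ d ∧ d - y < n + 1 ∧ d < size
          · exact absurd (by omega : y + n < size) hc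
          · rw [if_neg h2, if_neg h1]

-- outer fold over rows ys (each row y contributes via pvIn2 on csf y)
theorem pvOut2_getD (size : Nat) (csf : Nat → List Char) (ys : List Nat)
    (g : List (List Char)) (hg : g.length = size) (d : Nat) :
    (ys.foldl (fun g y => pvIn2 size y (csf y) (csf y).length g) g).getD d []
      = ys.reverse.flatMap (fun y =>
          if y ≤ d ∧ d - y < (csf y).length ∧ d < size then [(csf y).getD (d - y) ' '] else [])
        ++ g.getD d [] := by
  induction ys generalizing g with
  | nil => simp
  | cons y ys ih =>
      simp only [List.foldl_cons, List.reverse_cons, List.flatMap_append,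
        List.flatMap_cons, List.flatMap_nil, List.append_nil]
      rw [ih _ (by rw [pvIn2_length, hg]), pvIn2_getD size y (csf y) (csf y).length g hg d,
        List.append_assoc]

theorem pvOut2_length (size : Nat) (csf : Nat → List Char) (ys : List Nat)
    (g : List (List Char)) :
    (ys.foldl (fun g y => pvIn2 size y (csf y) (csf y).length g) g).length = g.length := by
  induction ys generalizing g with
  | nil => rfl
  | cons y ys ih => simp only [List.foldl_cons]; rw [ih, pvIn2_length]

-- the anti-diagonal reindexing: scanning columns x with y = d - x equals scanning rows
-- bottom-up with x = d - y
theorem pvReindex (lines : List String) (w h d : Nat) :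
    pvDiagA lines w h d
      = ((List.range h).map (fun k => h - 1 - k)).flatMap
          (fun y => if y ≤ d ∧ d - y < w then [pvChr lines y (d - y)] else []) := by
  induction h with
  | zero =>
      simp only [List.range_zero, List.map_nil, List.flatMap_nil]
      unfold pvDiagA
      rw [List.filterMap_eq_nil_iff.mpr]
      intro x _
      rw [if_neg (by omega)]
  | succ h ih =>
      rw [List.range_succ_eq_map, List.map_cons, List.map_map, List.flatMap_cons]
      have hmap : ((List.range h).map ((fun k => h + 1 - 1 - k) ∘ Nat.succ))
          = (List.range h).map (fun k => h - 1 - k) := by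
        apply List.map_congr_left; intro k _; simp [Function.comp]; omega
      rw [hmap, ← ih]
      simp only [Nat.add_sub_cancel, Nat.sub_zero]
      unfold pvDiagA
      clear ih hmap
      induction w with
      | zero =>
          simp only [List.range_zero, List.filterMap_nil, List.append_nil]
          rw [if_neg (by omega)]
      | succ w ihw =>
          rw [List.range_succ, List.filterMap_append, List.filterMap_append, ihw]
          simp only [List.filterMap_cons, List.filterMap_nil]
          by_cases hnew : h ≤ d ∧ d - h = w
          · have hempty : (List.range w).filterMap (fun x =>
                if x ≤ d ∧ d - x < h then some (pvChr lines (d - x) x) else none) = [] := by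
              rw [List.filterMap_eq_nil_iff]
              intro x hx
              rw [List.mem_range] at hx
              rw [if_neg (by omega)]
            have hfw1 : (if w ≤ d ∧ d - w < h + 1 then some (pvChr lines (d - w) w) else none)
                = some (pvChr lines h (d - h)) := by
              have e1 : d - w = h := by omega
              rw [if_pos (by omega), e1, hnew.2]
            have hfw0 : (if w ≤ d ∧ d - w < h then some (pvChr lines (d - w) w) else none)
                = none := by rw [if_neg (by omega)]
            have hrow1 : (if h ≤ d ∧ d - h < w + 1 then [pvChr lines h (d - h)] else [])
                = [pvChr lines h (d - h)] := if_pos ⟨hnew.1, by omega⟩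
            have hrow0 : (if h ≤ d ∧ d - h < w then [pvChr lines h (d - h)] else []) = [] :=
              if_neg (by omega)
            rw [hfw1, hfw0, hrow1, hrow0, hempty]
            simp
          · have hfw : (if w ≤ d ∧ d - w < h + 1 then some (pvChr lines (d - w) w) else none)
                = (if w ≤ d ∧ d - w < h then some (pvChr lines (d - w) w) else none) := by
              by_cases h1 : w ≤ d ∧ d - w < h
              · rw [if_pos h1, if_pos (by omega)]
              · by_cases h2 : w ≤ d ∧ d - w < h + 1
                · exact absurd (by omega) hnew
                · rw [if_neg h2, if_neg h1]
            have hrow : (if h ≤ d ∧ d - h < w + 1 then [pvChr lines h (d - h)] else [])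
                = (if h ≤ d ∧ d - h < w then [pvChr lines h (d - h)] else []) := by
              by_cases h1 : h ≤ d ∧ d - h < w
              · rw [if_pos h1, if_pos (by omega)]
              · by_cases h2 : h ≤ d ∧ d - h < w + 1
                · exact absurd (by omega) hnew
                · rw [if_neg h2, if_neg h1]
            rw [hfw, hrow]
            simp [List.append_assoc]

theorem pvA_diag (lines : List String) (d : Nat) :
    (PySem.List.pyRange 0 ((lines.getD 0 "").toList.length : Int)).filterMap (fun x =>
        if 0 ≤ (d : Int) - x ∧ (d : Int) - x < (lines.length : Int) then
          some ((PySem.List.pyGetD lines ((d : Int) - x) "").toList.getD x.toNat ' ')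
        else none)
      = pvDiagA lines (lines.getD 0 "").toList.length lines.length d := by
  rw [PySem.List.pyRange_zero_nat, List.filterMap_map]
  unfold pvDiagA
  congr 1
  funext x
  simp only [Function.comp]
  by_cases hc : x ≤ d ∧ d - x < lines.length
  · rw [if_pos (by omega), if_pos hc,
      show ((d : Int) - x) = ((d - x : Nat) : Int) by omega,
      PySem.List.pyGetD_natCast, Int.toNat_natCast]
    rfl
  · rw [if_neg (by omega), if_neg hc]

theorem pvA_eq (lines : List String) :
    diagonals_up lines
      = (((List.range (2 * lines.length)).map
            (pvDiagA lines (lines.getD 0 "").toList.length lines.length)).filter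
          (fun l => 4 ≤ l.length)).map String.ofList := by
  unfold diagonals_up
  simp only [PySem.List.len_eq, PySem.Str.len_eq, PySem.List.pyGetD_zero]
  rw [show ((lines.length : Int) * 2) = ((2 * lines.length : Nat) : Int) by push_cast; ring]
  rw [show PySem.List.pyRange 0 ((2 * lines.length : Nat) : Int)
      = (List.range (2 * lines.length)).map (fun (k : Nat) => (k : Int)) from
    PySem.List.pyRange_zero_nat _]
  rw [PySem.List.foldl_append_singleton_eq_map, List.nil_append, List.map_map]
  congr 2
  apply List.map_congr_left
  intro d _
  simp only [Function.comp]
  exact pvA_diag lines d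

-- reverse of List.range as the map k ↦ h-1-k
theorem pvRangeRev (h : Nat) :
    (List.range h).reverse = (List.range h).map (fun k => h - 1 - k) := by
  apply List.ext_getElem
  · simp
  intro i h1 h2
  simp only [List.getElem_reverse, List.length_range, List.getElem_range, List.getElem_map]

-- B's inner fold over one enumerated (sliced) row equals pvIn2
theorem pvB_inner (lines : List String) (y : Nat) (g : List (List Char)) :
    (PySem.List.enumerate
        (PySem.List.slice (PySem.List.pyGetD lines (y : Int) "").toList none
          (some ((lines.getD 0 "").toList.length : Int)))).foldl (fun g xc =>
        if (y : Int) + xc.1 < (lines.length : Int) * 2 then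
          PySem.List.pySetD g ((y : Int) + xc.1)
            (xc.2 :: PySem.List.pyGetD g ((y : Int) + xc.1) [])
        else g) g
      = pvIn2 (2 * lines.length) y
          ((lines.getD y "").toList.take (lines.getD 0 "").toList.length)
          ((lines.getD y "").toList.take (lines.getD 0 "").toList.length).length g := by
  rw [PySem.List.pyGetD_natCast, PySem.List.slice_to_natCast,
    PySem.List.enumerate_eq_map_pyRange _ ' ',
    PySem.List.len_eq, PySem.List.pyRange_zero_nat, List.map_map, List.foldl_map]
  unfold pvIn2
  apply PySem.List.foldl_congr_mem
  intro g' x hx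
  rw [List.mem_range] at hx
  simp only [Function.comp]
  by_cases hc : y + x < 2 * lines.length
  · rw [if_pos (by omega), if_pos hc,
      show ((y : Int) + x) = ((y + x : Nat) : Int) by omega,
      PySem.List.pySetD_natCast, PySem.List.pyGetD_natCast, PySem.List.pyGetD_natCast]
  · rw [if_neg (by omega), if_neg hc]

theorem pvB_eq (lines : List String) (hpre : Pre_diagonals_up lines) :
    diagonals_up_alt lines
      = (((List.range (2 * lines.length)).map
            (pvDiagA lines (lines.getD 0 "").toList.length lines.length)).filter
          (fun l => 4 ≤ l.length)).map String.ofList := by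
  unfold diagonals_up_alt
  simp only [PySem.List.len_eq, PySem.Str.len_eq, PySem.List.pyGetD_zero]
  rw [show ((lines.length : Int) * 2).toNat = 2 * lines.length by omega]
  rw [PySem.List.enumerate_eq_map_pyRange _ "",
    show PySem.List.pyRange 0 (PySem.List.len lines)
        = (List.range lines.length).map (fun (k : Nat) => (k : Int)) by
      rw [PySem.List.len_eq, PySem.List.pyRange_zero_nat],
    List.map_map, List.foldl_map]
  rw [PySem.List.foldl_congr_mem _ _
    (fun g (y : Nat) => pvIn2 (2 * lines.length) y
      ((lines.getD y "").toList.take (lines.getD 0 "").toList.length)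
      ((lines.getD y "").toList.take (lines.getD 0 "").toList.length).length g) _
    (by intro g y _
        simp only [Function.comp]
        rw [show ((lines.length : Int) * 2) = (lines.length : Int) * 2 by ring]
        exact pvB_inner lines y g)]
  congr 2
  -- groups = the list of diagonals
  set csf : Nat → List Char :=
    fun y => (lines.getD y "").toList.take (lines.getD 0 "").toList.length with hcsf
  have hglen : ((List.range lines.length).foldl
      (fun g y => pvIn2 (2 * lines.length) y (csf y) (csf y).length g)
      (List.replicate (2 * lines.length) ([] : List Char))).length = 2 * lines.length := by
    rw [pvOut2_length, List.length_replicate]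
  apply List.ext_getElem
  · rw [hglen, List.length_map, List.length_range]
  intro d hd1 hd2
  rw [List.getElem_map, List.getElem_range]
  have hd : d < 2 * lines.length := by rw [hglen] at hd1; exact hd1
  have hrepl : (List.replicate (2 * lines.length) ([] : List Char)).getD d [] = [] := by
    rw [List.getD_eq_getElem?_getD, List.getElem?_replicate]
    split <;> rfl
  have key : ((List.range lines.length).foldl
      (fun g y => pvIn2 (2 * lines.length) y (csf y) (csf y).length g)
      (List.replicate (2 * lines.length) ([] : List Char))).getD d []
      = pvDiagA lines (lines.getD 0 "").toList.length lines.length d := by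
    rw [pvOut2_getD _ _ _ _ List.length_replicate d, hrepl, List.append_nil,
      pvRangeRev, pvReindex]
    rw [List.flatMap_eq_foldl, List.flatMap_eq_foldl]
    apply PySem.List.foldl_congr_mem
    intro acc y hy
    rw [List.mem_map] at hy
    obtain ⟨k, hk, rfl⟩ := hy
    rw [List.mem_range] at hk
    set y := lines.length - 1 - k with hy
    have hyh : y < lines.length := by omega
    congr 1
    by_cases h1 : y ≤ d ∧ d - y < (lines.getD 0 "").toList.length
    · have hxlen : d - y < (lines.getD y "").toList.length :=
        hpre.2 y hyh (d - y) h1.2 (by omega)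
      have hcs : (csf y).length = min (lines.getD 0 "").toList.length
          (lines.getD y "").toList.length := by
        rw [hcsf]; simp [List.length_take]
      rw [if_pos ⟨h1.1, by omega, hd⟩, if_pos h1]
      congr 1
      rw [hcsf]
      simp only [pvChr]
      rw [List.getD_eq_getElem?_getD, List.getD_eq_getElem?_getD, List.getElem?_take]
      have hcond : d - y < (lines[0]?.getD "").toList.length := by
        have h2 := h1.2
        rwa [List.getD_eq_getElem?_getD] at h2
      rw [if_pos hcond, ← List.getD_eq_getElem?_getD]
    · have hfalse : ¬ (y ≤ d ∧ d - y < (csf y).length ∧ d < 2 * lines.length) := by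
        rw [hcsf]
        simp only [List.length_take]
        rintro ⟨a, b, -⟩
        exact h1 ⟨a, by omega⟩
      rw [if_neg hfalse, if_neg h1]
  rw [← key]
  exact List.getElem_eq_getD []

-- ===== VERDICT (by name: the statement is the Claim_ definition above) =====
theorem diagonals_up_spec : Claim_equal_diagonals_up := by
  intro lines _ hpre
  unfold Spec_diagonals_up
  rw [pvA_eq, pvB_eq lines hpre]
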